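-- pv_equiv track=rewrite | github.com/wangqin1723-max/pypto | python/pypto/language/parser/diagnostics/renderer.py | _calculate_token_length
-- ===== SOURCE A (Python) =====
-- def _calculate_token_length(line_content: str, column: int) -> int:
--     """Calculate the length of token at given column for caret highlighting.
--
--     Args:
--         line_content: Source line content
--         column: Starting column position
--
--     Returns:
--         Length of token (minimum 1)
--     """
--     if column >= len(line_content):
--         return 1
--
--     def is_ident_char(c: str) -> bool:
--         return c.isalnum() or c == "_"
--
--     token_chars = 0
--     i = column
--     while i < len(line_content):
--         char = line_content[i]
--         if is_ident_char(char):
--             token_chars += 1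
--             i += 1
--             continue
--         # Extend across `.` only when it's part of a dotted identifier
--         # (identifier char on both sides), so dotted callees like
--         # `pl.range` render as a single token.
--         if (
--             char == "."
--             and i > column
--             and is_ident_char(line_content[i - 1])
--             and i + 1 < len(line_content)
--             and is_ident_char(line_content[i + 1])
--         ):
--             token_chars += 1
--             i += 1
--             continue
--         break
--
--     return token_chars if token_chars > 0 else 1
-- ===== SOURCE B (Python) =====
-- def _calculate_token_length(line_content: str, column: int) -> int:
--     """Calculate the length of token at given column for caret highlighting."""
--     n = len(line_content)
--     if column >= n:
--         return 1
--
--     def is_ident_char(c: str) -> bool: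
--         return c.isalnum() or c == "_"
--
--     # Leading run of identifier characters starting at `column`.
--     i = column
--     while i < n and is_ident_char(line_content[i]):
--         i += 1
--     if i == column:
--         return 1
--     # Extend across dots that join identifier segments (e.g. `pl.range`).
--     while i + 1 < n and line_content[i] == "." and is_ident_char(line_content[i + 1]):
--         i += 1
--         while i < n and is_ident_char(line_content[i]):
--             i += 1
--     return i - column
-- ===== Notes on version B (the rewrite author's own statement) =====
-- stated objective: simpler
-- what changed: A's single char-by-char while loop with a token_chars counter and a three-way branch per character is replaced by a run-by-run scan: an inner loop consumes a whole identifier run, an outer loop hops over dots joining runs, and the length falls out as an index difference i - column.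
import Mathlib
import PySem

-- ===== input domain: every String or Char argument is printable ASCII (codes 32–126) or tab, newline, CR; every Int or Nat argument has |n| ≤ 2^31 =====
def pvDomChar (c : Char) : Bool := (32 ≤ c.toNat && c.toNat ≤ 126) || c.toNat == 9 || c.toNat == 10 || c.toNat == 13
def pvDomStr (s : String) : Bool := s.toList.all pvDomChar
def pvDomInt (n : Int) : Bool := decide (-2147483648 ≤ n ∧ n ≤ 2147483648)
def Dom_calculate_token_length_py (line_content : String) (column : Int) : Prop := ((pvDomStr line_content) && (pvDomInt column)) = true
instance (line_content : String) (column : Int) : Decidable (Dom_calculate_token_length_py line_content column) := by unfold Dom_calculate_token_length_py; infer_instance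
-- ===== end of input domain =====

-- B replaces A's single char-by-char while loop (one counter, three branch kinds per char)
-- by a run-by-run scan: one inner loop eats a whole identifier run, an outer loop hops over
-- dots that join runs, and the length is recovered as an index difference. Objective: simpler
-- decomposition, same cost.

-- ===== PORT A =====
-- is_ident_char(c) = c.isalnum() or c == "_"
def pyIsIdentChar (c : Char) : Bool := PySem.Chars.isalnum c || c == '_'

-- line_content[j] exists and is an identifier char (`false` for an out-of-range index is a
-- totality guard: within Pre_ every index this is applied to is in range, Python never raises there)
def identAt (cs : List Char) (j : Int) : Bool :=
  match PySem.List.pyGet? cs j with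
  | some c => pyIsIdentChar c
  | none => false

-- A's while loop: char by char, counting token_chars
def calcTokLoopA (cs : List Char) (column : Int) (i : Int) (tc : Int) : Int :=
  if _h : i < (cs.length : Int) then
    match PySem.List.pyGet? cs i with
    | none => tc  -- unreachable within Pre_ (Python raises IndexError here)
    | some c =>
      if pyIsIdentChar c then calcTokLoopA cs column (i + 1) (tc + 1)
      else if c = '.' ∧ column < i ∧ identAt cs (i - 1) = true
             ∧ i + 1 < (cs.length : Int) ∧ identAt cs (i + 1) = true then
        calcTokLoopA cs column (i + 1) (tc + 1)
      else tc
  else tc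
termination_by ((cs.length : Int) - i).toNat
decreasing_by all_goals omega

def calculate_token_length_py (line_content : String) (column : Int) : Int :=
  let cs := line_content.toList
  if column ≥ (cs.length : Int) then 1
  else
    let token_chars := calcTokLoopA cs column column 0
    if token_chars > 0 then token_chars else 1

-- ===== PORT B =====
-- B's inner loop: advance over the run of identifier chars starting at i
def calcRunB (cs : List Char) (i : Int) : Int :=
  if _h : i < (cs.length : Int) ∧ identAt cs i = true then calcRunB cs (i + 1) else i
termination_by ((cs.length : Int) - i).toNat
decreasing_by omega

-- needed by calcOuterB's termination proof
theorem calcRunB_ge (cs : List Char) (i : Int) : i ≤ calcRunB cs i := by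
  unfold calcRunB
  split
  · have := calcRunB_ge cs (i + 1); omega
  · omega
termination_by ((cs.length : Int) - i).toNat
decreasing_by omega

-- B's outer loop: hop over a dot joining identifier runs, then eat the next run
def calcOuterB (cs : List Char) (i : Int) : Int :=
  if _h : i + 1 < (cs.length : Int) ∧ PySem.List.pyGet? cs i = some '.' ∧ identAt cs (i + 1) = true then
    calcOuterB cs (calcRunB cs (i + 1))
  else i
termination_by ((cs.length : Int) - i).toNat
decreasing_by have := calcRunB_ge cs (i + 1); omega

def calculate_token_length_py_alt (line_content : String) (column : Int) : Int :=
  let cs := line_content.toList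
  if column ≥ (cs.length : Int) then 1
  else
    let i := calcRunB cs column
    if i = column then 1
    else calcOuterB cs i - column

-- ===== PRECONDITION & SPEC =====
-- Pre_ excludes exactly the inputs where the Python A raises IndexError (column < -len(line_content),
-- where the first indexing of the loop is out of range); B raises there too.
def Pre_calculate_token_length_py (line_content : String) (column : Int) : Prop :=
  -(line_content.toList.length : Int) ≤ column
instance (line_content : String) (column : Int) : Decidable (Pre_calculate_token_length_py line_content column) := by unfold Pre_calculate_token_length_py; infer_instance

def pvWitness_calculate_token_length_py : String × Int := ("pl.range(10)", 3)

def Spec_calculate_token_length_py (line_content : String) (column : Int) (out : Int) : Prop := out = calculate_token_length_py_alt line_content column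
instance (line_content : String) (column : Int) (out : Int) : Decidable (Spec_calculate_token_length_py line_content column out) := by unfold Spec_calculate_token_length_py; infer_instance

-- ===== CLAIM (what is proved, stated in full; the proofs are below) =====
def Claim_equal_calculate_token_length_py : Prop := ∀ (line_content : String) (column : Int), Dom_calculate_token_length_py line_content column → Pre_calculate_token_length_py line_content column → Spec_calculate_token_length_py line_content column (calculate_token_length_py line_content column)

-- ===== LEMMAS AND PROOFS =====

theorem pyGet?_exists (cs : List Char) (i : Int) (h1 : -(cs.length : Int) ≤ i)
    (h2 : i < (cs.length : Int)) : ∃ c, PySem.List.pyGet? cs i = some c := by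
  cases hg : PySem.List.pyGet? cs i with
  | none => rw [PySem.List.pyGet?_eq_none_iff, PySem.Raise.InRange] at hg; omega
  | some c => exact ⟨c, rfl⟩

theorem calcOuterB_ge (cs : List Char) (i : Int) : i ≤ calcOuterB cs i := by
  unfold calcOuterB
  split
  · rename_i h
    have h1 := calcRunB_ge cs (i + 1)
    have h2 := calcOuterB_ge cs (calcRunB cs (i + 1))
    omega
  · omega
termination_by ((cs.length : Int) - i).toNat
decreasing_by have := calcRunB_ge cs (i + 1); omega

-- The loop invariant: position i is just past a consumed char, which was either an identifier
-- char, or a dot known to be followed by an identifier char.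
def TokInv (cs : List Char) (i : Int) : Prop :=
  ∃ c, PySem.List.pyGet? cs (i - 1) = some c ∧
    (pyIsIdentChar c = true ∨ (c = '.' ∧ i < (cs.length : Int) ∧ identAt cs i = true))

-- Main lemma: from any invariant state, A's remaining char-by-char scan adds exactly what
-- B's run/dot scan measures from i.
theorem loop_eq (cs : List Char) (col : Int) (k : Nat) :
    ∀ (i tc : Int), ((cs.length : Int) - i).toNat = k →
      -(cs.length : Int) ≤ col → col < i → i ≤ (cs.length : Int) → TokInv cs i →
      calcTokLoopA cs col i tc = tc + (calcOuterB cs (calcRunB cs i) - i) := by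
  induction k using Nat.strong_induction_on with
  | _ k IH =>
    intro i tc hk hcol hlt hle hinv
    by_cases hin : i < (cs.length : Int)
    · obtain ⟨c, hc⟩ := pyGet?_exists cs i (by omega) hin
      have hidAt : identAt cs i = pyIsIdentChar c := by simp [identAt, hc]
      by_cases hident : pyIsIdentChar c = true
      · -- identifier char: both sides step to i+1
        have hA : calcTokLoopA cs col i tc = calcTokLoopA cs col (i + 1) (tc + 1) := by
          rw [calcTokLoopA]; simp [hin, hc, hident]
        have hR : calcRunB cs i = calcRunB cs (i + 1) := by
          rw [calcRunB]; simp [hin, hidAt, hident]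
        have hIH := IH (((cs.length : Int) - (i + 1)).toNat) (by omega) (i + 1) (tc + 1)
          rfl hcol (by omega) (by omega)
          ⟨c, by simpa using hc, Or.inl hident⟩
        rw [hA, hIH, hR]; ring
      · -- not an identifier char: A's run ends unless the dotted-identifier rule applies
        have hprev : identAt cs (i - 1) = true := by
          obtain ⟨p, hp, hcase⟩ := hinv
          rcases hcase with hpid | ⟨_, _, hid⟩
          · simp [identAt, hp, hpid]
          · rw [hidAt] at hid; exact absurd hid hident
        have hRi : calcRunB cs i = i := by
          rw [calcRunB]; simp [hidAt, hident]
        by_cases hdot : c = '.' ∧ i + 1 < (cs.length : Int) ∧ identAt cs (i + 1) = true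
        · obtain ⟨hdot', hlt1, hid1⟩ := hdot
          have hA : calcTokLoopA cs col i tc = calcTokLoopA cs col (i + 1) (tc + 1) := by
            rw [calcTokLoopA]
            simp [hin, hc, hdot', hprev, hlt1, hid1, hlt]
          have hO : calcOuterB cs i = calcOuterB cs (calcRunB cs (i + 1)) := by
            rw [calcOuterB]; simp [hlt1, hdot' ▸ hc, hid1]
          have hIH := IH (((cs.length : Int) - (i + 1)).toNat) (by omega) (i + 1) (tc + 1)
            rfl hcol (by omega) (by omega)
            ⟨c, by simpa using hc, Or.inr ⟨hdot', by omega, by simpa using hid1⟩⟩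
          rw [hA, hIH, hRi, hO]; ring
        · -- scan stops on both sides
          have hA : calcTokLoopA cs col i tc = tc := by
            rw [calcTokLoopA]
            simp only [hin, dif_pos, hc]
            rw [if_neg hident, if_neg]
            rintro ⟨h1, _, _, h4, h5⟩
            exact hdot ⟨h1, h4, h5⟩
          have hO : calcOuterB cs i = i := by
            rw [calcOuterB]
            rw [dif_neg]
            rintro ⟨h1, h2, h3⟩
            rw [hc] at h2
            exact hdot ⟨by simpa using h2, h1, h3⟩
          rw [hA, hRi, hO]; ring
    · -- i = len: everything stops
      have hi : i = (cs.length : Int) := by omega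
      have hA : calcTokLoopA cs col i tc = tc := by rw [calcTokLoopA]; simp [hin]
      have hR : calcRunB cs i = i := by rw [calcRunB]; simp [hin]
      have hO : calcOuterB cs i = i := by rw [calcOuterB]; rw [dif_neg]; rintro ⟨h1, _, _⟩; omega
      rw [hA, hR, hO]; ring

-- ===== VERDICT (by name: the statement is the Claim_ definition above) =====
theorem calculate_token_length_py_spec : Claim_equal_calculate_token_length_py := by
  intro line_content column _hdom hpre
  unfold Spec_calculate_token_length_py
  unfold calculate_token_length_py calculate_token_length_py_alt
  set cs := line_content.toList with hcs
  have hpre' : -(cs.length : Int) ≤ column := hpre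
  by_cases hcol : column ≥ (cs.length : Int)
  · simp [hcol]
  · simp only [hcol, ite_false]
    have hin : column < (cs.length : Int) := by omega
    obtain ⟨c0, hc0⟩ := pyGet?_exists cs column (by omega) hin
    have hidAt : identAt cs column = pyIsIdentChar c0 := by simp [identAt, hc0]
    by_cases hident : pyIsIdentChar c0 = true
    · -- first char is an identifier char
      have hA : calcTokLoopA cs column column 0 = calcTokLoopA cs column (column + 1) 1 := by
        rw [calcTokLoopA]; simp [hin, hc0, hident]
      have hIH := loop_eq cs column (((cs.length : Int) - (column + 1)).toNat) (column + 1) 1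
        rfl (by omega) (by omega) (by omega)
        ⟨c0, by simpa using hc0, Or.inl hident⟩
      have hR : calcRunB cs column = calcRunB cs (column + 1) := by
        rw [calcRunB]; simp [hin, hidAt, hident]
      have hne : ¬ (calcRunB cs column = column) := by
        have := calcRunB_ge cs (column + 1); rw [hR]; omega
      have hpos : calcTokLoopA cs column column 0 > 0 := by
        rw [hA, hIH]
        have h1 := calcRunB_ge cs (column + 1)
        have h2 := calcOuterB_ge cs (calcRunB cs (column + 1))
        omega
      simp only [hne, ite_false, hpos, if_pos]
      rw [hA, hIH, hR]; ring
    · -- no identifier char at column: both return 1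
      have hA : calcTokLoopA cs column column 0 = 0 := by
        rw [calcTokLoopA]
        simp only [hin, dif_pos, hc0]
        rw [if_neg hident, if_neg]
        rintro ⟨_, h2, _⟩; omega
      have hR : calcRunB cs column = column := by
        rw [calcRunB]; simp [hidAt, hident]
      simp [hA, hR]
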